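-- pv_equiv track=rewrite | github.com/hungmanh21/One-problem-One-day | 1233 Remove Sub-Folders from the Filesystem.py | check_is_sub_folder
-- ===== SOURCE A (Python) =====
-- def check_is_sub_folder(current_folder, next_folder):
--     current_folder_list = current_folder.split("/")
--     next_folder_list = next_folder.split("/")
--     if len(next_folder_list) == len(current_folder_list):
--         return False
--     else:
--         for i in range(min(len(next_folder_list), len(current_folder_list))):
--             if next_folder_list[i] != current_folder_list[i]:
--                 return False
--         return True
-- ===== SOURCE B (Python) =====
-- def check_is_sub_folder(current_folder, next_folder):
--     return (next_folder.startswith(current_folder + "/")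
--             or current_folder.startswith(next_folder + "/"))
-- ===== Notes on version B (the rewrite author's own statement) =====
-- stated objective: idiomatic
-- what changed: Replaces A's split-into-component-lists plus equal-length test and index loop by a direct two-way '/'-boundary string-prefix test (startswith on the raw strings), with no split and no loop.
import Mathlib
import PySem

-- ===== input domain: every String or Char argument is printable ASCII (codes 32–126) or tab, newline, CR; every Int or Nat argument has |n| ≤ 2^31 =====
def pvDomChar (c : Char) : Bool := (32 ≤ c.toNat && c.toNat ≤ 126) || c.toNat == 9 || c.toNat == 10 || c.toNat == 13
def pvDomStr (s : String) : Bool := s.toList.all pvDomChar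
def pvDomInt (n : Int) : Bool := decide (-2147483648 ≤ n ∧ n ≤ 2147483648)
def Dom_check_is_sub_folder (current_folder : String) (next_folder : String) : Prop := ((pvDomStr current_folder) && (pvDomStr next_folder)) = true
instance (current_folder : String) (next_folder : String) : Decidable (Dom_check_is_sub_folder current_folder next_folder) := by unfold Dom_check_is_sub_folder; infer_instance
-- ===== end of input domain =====

-- B replaces A's split-into-components loop by a direct '/'-boundary string-prefix test in
-- both directions (idiomatic; no split, no index loop).

-- ===== PORT A =====
-- the 'for i in range(...): if next_folder_list[i] != current_folder_list[i]: return False' loop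
def pvALoop (nl cl : List (List Char)) : List Int → Bool
  | [] => true
  | i :: rest =>
      if PySem.List.pyGetD nl i [] ≠ PySem.List.pyGetD cl i [] then false
      else pvALoop nl cl rest

def check_is_sub_folder (current_folder : String) (next_folder : String) : Bool :=
  let current_folder_list := PySem.Chars.splitOn current_folder.toList ['/']
  let next_folder_list := PySem.Chars.splitOn next_folder.toList ['/']
  if next_folder_list.length == current_folder_list.length then false
  else
    pvALoop next_folder_list current_folder_list
      (PySem.List.pyRange 0 (min next_folder_list.length current_folder_list.length) 1)

-- ===== PORT B =====
def check_is_sub_folder_alt (current_folder : String) (next_folder : String) : Bool :=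
  PySem.Chars.startswith next_folder.toList (current_folder.toList ++ ['/']) ||
  PySem.Chars.startswith current_folder.toList (next_folder.toList ++ ['/'])

-- ===== PRECONDITION & SPEC =====
def Spec_check_is_sub_folder (current_folder : String) (next_folder : String) (out : Bool) : Prop := out = check_is_sub_folder_alt current_folder next_folder
instance (current_folder : String) (next_folder : String) (out : Bool) : Decidable (Spec_check_is_sub_folder current_folder next_folder out) := by unfold Spec_check_is_sub_folder; infer_instance

-- ===== CLAIM (what is proved, stated in full; the proofs are below) =====
def Claim_equal_check_is_sub_folder : Prop := ∀ (current_folder : String) (next_folder : String), Dom_check_is_sub_folder current_folder next_folder → Spec_check_is_sub_folder current_folder next_folder (check_is_sub_folder current_folder next_folder)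

-- ===== LEMMAS AND PROOFS =====

-- A simple structural model of s.split("/") …
def pvSplit : List Char → List (List Char)
  | [] => [[]]
  | c :: rest =>
      if c = '/' then [] :: pvSplit rest
      else
        match pvSplit rest with
        | [] => [[c]]
        | h :: t => (c :: h) :: t

-- … and of "/".join
def pvJoin : List (List Char) → List Char
  | [] => []
  | [x] => x
  | x :: y :: t => x ++ '/' :: pvJoin (y :: t)

theorem pvSplit_ne_nil (l : List Char) : pvSplit l ≠ [] := by
  cases l with
  | nil => simp [pvSplit]
  | cons c rest =>
      simp only [pvSplit]
      split
      · simp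
      · cases h : pvSplit rest <;> simp

def pvConsHd (p : List Char) : List (List Char) → List (List Char)
  | [] => [p]
  | h :: t => (p ++ h) :: t

theorem pvGo_eq (fuel : Nat) (l cur : List Char) (acc : List (List Char))
    (h : l.length < fuel) :
    PySem.Chars.splitOn.go ['/'] fuel l cur acc
      = acc.reverse ++ pvConsHd cur.reverse (pvSplit l) := by
  induction fuel generalizing l cur acc with
  | zero => omega
  | succ f ih =>
      cases l with
      | nil =>
          simp [PySem.Chars.splitOn.go, pvSplit, pvConsHd]
      | cons c rest =>
          simp only [PySem.Chars.splitOn.go]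
          by_cases hc : c = '/'
          · subst hc
            have hp : List.isPrefixOf ['/'] ('/' :: rest) = true := by
              simp [List.isPrefixOf]
            rw [if_pos hp]
            have : List.drop (List.length ['/']) ('/' :: rest) = rest := by simp
            rw [this, ih rest [] (List.reverse cur :: acc) (by simpa using Nat.lt_of_succ_lt_succ h)]
            have hne := pvSplit_ne_nil rest
            cases hs : pvSplit rest with
            | nil => exact absurd hs hne
            | cons sh st => simp [pvSplit, pvConsHd, hs]
          · have hp : List.isPrefixOf ['/'] (c :: rest) = false := by
              simp [List.isPrefixOf]
              intro hce; exact hc hce.symm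
            rw [if_neg (by simp [hp])]
            rw [ih rest (c :: cur) acc (by simpa using Nat.lt_of_succ_lt_succ h)]
            have hne := pvSplit_ne_nil rest
            cases hs : pvSplit rest with
            | nil => exact absurd hs hne
            | cons sh st => simp [pvSplit, pvConsHd, hs, hc]

theorem pvSplitOn_eq (l : List Char) : PySem.Chars.splitOn l ['/'] = pvSplit l := by
  unfold PySem.Chars.splitOn
  rw [pvGo_eq _ _ _ _ (by omega)]
  have hne := pvSplit_ne_nil l
  cases hs : pvSplit l with
  | nil => exact absurd hs hne
  | cons h t => simp [pvConsHd]

theorem pvJoin_cons (x : List Char) (s : List (List Char)) (hs : s ≠ []) :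
    pvJoin (x :: s) = x ++ '/' :: pvJoin s := by
  cases s with
  | nil => exact absurd rfl hs
  | cons y t => rfl

theorem pvJoin_pvSplit (l : List Char) : pvJoin (pvSplit l) = l := by
  induction l with
  | nil => rfl
  | cons c rest ih =>
      by_cases hc : c = '/'
      · subst hc
        have hsp : pvSplit ('/' :: rest) = [] :: pvSplit rest := by simp [pvSplit]
        rw [hsp, pvJoin_cons _ _ (pvSplit_ne_nil rest), ih]
        simp
      · simp only [pvSplit, if_neg hc]
        have hne := pvSplit_ne_nil rest
        cases hs : pvSplit rest with
        | nil => exact absurd hs hne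
        | cons h t =>
            rw [hs] at ih
            cases t with
            | nil => simp [pvJoin] at ih ⊢; exact ih
            | cons y t' =>
                rw [pvJoin_cons _ _ (by simp)] at ih
                rw [pvJoin_cons _ _ (by simp)]
                simp at ih ⊢
                exact ih

theorem pvSplit_append (a b : List Char) :
    pvSplit (a ++ '/' :: b) = pvSplit a ++ pvSplit b := by
  induction a with
  | nil => simp [pvSplit]
  | cons c a' ih =>
      by_cases hc : c = '/'
      · subst hc
        simp [pvSplit, ih]
      · simp only [List.cons_append, pvSplit, if_neg hc, ih]
        have hne := pvSplit_ne_nil a'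
        cases hs : pvSplit a' with
        | nil => exact absurd hs hne
        | cons h t => simp

theorem pvJoin_append (xs ys : List (List Char)) (hx : xs ≠ []) (hy : ys ≠ []) :
    pvJoin (xs ++ ys) = pvJoin xs ++ '/' :: pvJoin ys := by
  induction xs with
  | nil => exact absurd rfl hx
  | cons x xs' ih =>
      cases xs' with
      | nil =>
          rw [List.singleton_append, pvJoin_cons _ _ hy]
          rfl
      | cons z zs =>
          rw [List.cons_append, pvJoin_cons _ _ (by simp), pvJoin_cons _ _ (by simp),
            ih (by simp) ]
          simp

-- B's one-sided test, characterised by the component lists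
theorem pvStarts_iff (c n : List Char) :
    PySem.Chars.startswith n (c ++ ['/']) = true ↔
      pvSplit c <+: pvSplit n ∧ (pvSplit c).length < (pvSplit n).length := by
  rw [PySem.Chars.startswith_iff]
  constructor
  · rintro ⟨t, ht⟩
    have hn : n = c ++ '/' :: t := by simpa using ht.symm
    subst hn
    rw [pvSplit_append]
    refine ⟨⟨pvSplit t, rfl⟩, ?_⟩
    have := pvSplit_ne_nil t
    have : 0 < (pvSplit t).length := List.length_pos_iff.mpr this
    simp [List.length_append]; omega
  · rintro ⟨⟨rest, hrest⟩, hlen⟩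
    have hrne : rest ≠ [] := by
      intro h; subst h; simp at hrest; rw [hrest] at hlen; omega
    have hn : n = c ++ '/' :: pvJoin rest := by
      calc n = pvJoin (pvSplit n) := (pvJoin_pvSplit n).symm
        _ = pvJoin (pvSplit c ++ rest) := by rw [hrest]
        _ = pvJoin (pvSplit c) ++ '/' :: pvJoin rest :=
              pvJoin_append _ _ (pvSplit_ne_nil c) hrne
        _ = c ++ '/' :: pvJoin rest := by rw [pvJoin_pvSplit]
    exact ⟨pvJoin rest, by simp [hn]⟩

-- A's loop, characterised
theorem pvALoop_iff (nl cl : List (List Char)) (is : List Int) :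
    pvALoop nl cl is = true ↔
      ∀ i ∈ is, PySem.List.pyGetD nl i [] = PySem.List.pyGetD cl i [] := by
  induction is with
  | nil => simp [pvALoop]
  | cons i rest ih =>
      rw [show pvALoop nl cl (i :: rest)
            = if PySem.List.pyGetD nl i [] ≠ PySem.List.pyGetD cl i [] then false
              else pvALoop nl cl rest from rfl]
      split
      · rename_i hne
        simp only [Bool.false_eq_true, false_iff]
        intro hall
        exact hne (hall i (by simp))
      · rename_i heq
        rw [ih]
        push_neg at heq
        constructor
        · intro hall j hj
          rcases List.mem_cons.mp hj with h | h
          · subst h; exact heq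
          · exact hall j h
        · intro hall j hj
          exact hall j (List.mem_cons_of_mem _ hj)

theorem pvALoop_range_iff (nl cl : List (List Char)) (m : Nat)
    (hm : m ≤ nl.length) (hm' : m ≤ cl.length) :
    pvALoop nl cl (PySem.List.pyRange 0 m 1) = true ↔
      ∀ k, ∀ hk : k < m, nl[k]? = cl[k]? := by
  rw [pvALoop_iff]
  constructor
  · intro hall k hk
    have h := hall (k : Int) (by rw [PySem.List.mem_pyRange_one]; omega)
    rw [PySem.List.pyGetD_natCast, PySem.List.pyGetD_natCast] at h
    rw [List.getD_eq_getElem?_getD, List.getD_eq_getElem?_getD] at h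
    rw [(nl.getElem?_eq_getElem (by omega) : nl[k]? = _),
        (cl.getElem?_eq_getElem (by omega) : cl[k]? = _)] at h ⊢
    simpa using h
  · intro hall i hi
    rw [PySem.List.mem_pyRange_one] at hi
    obtain ⟨k, rfl⟩ : ∃ k : Nat, i = (k : Int) := ⟨i.toNat, by omega⟩
    have hk : k < m := by omega
    have h := hall k hk
    rw [PySem.List.pyGetD_natCast, PySem.List.pyGetD_natCast,
      List.getD_eq_getElem?_getD, List.getD_eq_getElem?_getD, h]

theorem pv_prefix_iff_forall (a b : List (List Char)) (h : a.length ≤ b.length) :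
    a <+: b ↔ ∀ k, ∀ hk : k < a.length, a[k]? = b[k]? := by
  rw [List.prefix_iff_getElem?]
  constructor
  · intro hall k hk
    rw [hall k hk, List.getElem?_eq_getElem hk]
  · intro hall k hk
    rw [← hall k hk, List.getElem?_eq_getElem hk]

-- ===== VERDICT (by name: the statement is the Claim_ definition above) =====
theorem check_is_sub_folder_spec : Claim_equal_check_is_sub_folder := by
  intro c n _
  unfold Spec_check_is_sub_folder check_is_sub_folder check_is_sub_folder_alt
  simp only [pvSplitOn_eq]
  rw [Bool.eq_iff_iff, Bool.or_eq_true, pvStarts_iff, pvStarts_iff]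
  generalize pvSplit c.toList = cl
  generalize pvSplit n.toList = nl
  by_cases hlen : nl.length = cl.length
  · rw [if_pos (by simpa using hlen)]
    simp only [Bool.false_eq_true, false_iff]
    rintro (⟨_, h⟩ | ⟨_, h⟩) <;> omega
  · rw [if_neg (by simpa using hlen)]
    rcases Nat.lt_or_ge nl.length cl.length with hlt | hge
    · have hmin : min nl.length cl.length = nl.length := by omega
      rw [← Nat.cast_min, hmin, pvALoop_range_iff nl cl nl.length (le_refl _) (by omega),
        ← pv_prefix_iff_forall nl cl (by omega)]
      constructor
      · intro hp; exact Or.inr ⟨hp, hlt⟩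
      · rintro (⟨_, h⟩ | ⟨hp, _⟩); · omega
        · exact hp
    · have hlt : cl.length < nl.length := by omega
      have hmin : min nl.length cl.length = cl.length := by omega
      rw [← Nat.cast_min, hmin, pvALoop_range_iff nl cl cl.length (by omega) (le_refl _)]
      rw [show (∀ k, ∀ _ : k < cl.length, nl[k]? = cl[k]?) ↔
            (∀ k, ∀ _ : k < cl.length, cl[k]? = nl[k]?) from
          ⟨fun h k hk => (h k hk).symm, fun h k hk => (h k hk).symm⟩,
        ← pv_prefix_iff_forall cl nl (by omega)]
      constructor
      · intro hp; exact Or.inl ⟨hp, hlt⟩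
      · rintro (⟨hp, _⟩ | ⟨_, h⟩); · exact hp
        · omega
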